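-- pv_equiv track=rewrite | github.com/alexinf/AlgoritmosAvanzados | 2do contest/f.py | make_battle
-- ===== SOURCE A (Python) =====
-- def make_battle( battle, n_brothers, attak ):
--
--     n_row = len(battle)
--     n_col = len(battle[0])
--     temp = [ [ battle[i][j] for j in range(n_col)] for i in range(n_row)]
--
--     for i in range(n_row):
--         for j in range(n_col):
--             if i+1 < n_row:
--                 if attak[battle[i][j]] == battle[i+1][j]:
--                     temp[i+1][j] = battle[i][j]
--             if i-1 >= 0:
--                if attak[battle[i][j]] == battle[i-1][j]:
--                     temp[i-1][j] = battle[i][j]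
--
--             if j+1 < n_col:
--                 if attak[battle[i][j]] == battle[i][j+1]:
--                     temp[i][j+1] = battle[i][j]
--
--             if j-1 >= 0:
--                 if attak[battle[i][j]] == battle[i][j-1]:
--                     temp[i][j-1] = battle[i][j]
--     return temp
-- ===== SOURCE B (Python) =====
-- def make_battle(battle, n_brothers, attak):
--     # Gather formulation: each output cell is computed directly from the original
--     # grid's four neighbours (up, left, right, down); the last matching neighbour
--     # in that order wins, which is exactly the scatter's row-major last-writer order.
--     n_row = len(battle)
--     n_col = len(battle[0])
--     res = []
--     for i in range(n_row):
--         row = []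
--         for j in range(n_col):
--             t = battle[i][j]
--             v = t
--             for r, c in ((i - 1, j), (i, j - 1), (i, j + 1), (i + 1, j)):
--                 if 0 <= r < n_row and 0 <= c < n_col:
--                     w = battle[r][c]
--                     if attak[w] == t:
--                         v = w
--             row.append(v)
--         res.append(row)
--     return res
-- ===== Notes on version B (the rewrite author's own statement) =====
-- stated objective: alternative
-- what changed: Replaces the scatter (row-major loop that conditionally overwrites the four neighbours of each cell in a mutable copy) by a pure gather that computes each output cell directly from its four original neighbours in the order up, left, right, down, which reproduces the scatter's last-writer-wins result without any in-place mutation.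
import Mathlib
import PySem

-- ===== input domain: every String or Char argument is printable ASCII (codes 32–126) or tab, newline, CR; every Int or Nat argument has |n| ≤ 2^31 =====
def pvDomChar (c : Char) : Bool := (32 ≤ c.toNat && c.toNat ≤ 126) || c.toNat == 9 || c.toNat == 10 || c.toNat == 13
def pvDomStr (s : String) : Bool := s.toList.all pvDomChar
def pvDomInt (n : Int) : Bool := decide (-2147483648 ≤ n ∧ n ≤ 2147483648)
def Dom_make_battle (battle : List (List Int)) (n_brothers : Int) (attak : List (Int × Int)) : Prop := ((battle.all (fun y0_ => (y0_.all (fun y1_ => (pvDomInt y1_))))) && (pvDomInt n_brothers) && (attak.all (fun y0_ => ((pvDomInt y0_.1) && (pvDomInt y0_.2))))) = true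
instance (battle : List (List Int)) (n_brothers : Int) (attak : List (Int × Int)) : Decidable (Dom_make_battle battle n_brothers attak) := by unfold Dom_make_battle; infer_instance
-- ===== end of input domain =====

-- B replaces A's scatter (row-major loop conditionally overwriting the four neighbours of each
-- cell in a mutable copy) by a pure gather computing each output cell from its four original
-- neighbours in the scatter's last-writer order (objective: alternative algorithm, same cost).

-- ===== PORT A =====
def pvCell (g : List (List Int)) (i j : Nat) : Int := (g.getD i []).getD j 0

def pvAtk (attak : List (Int × Int)) (k : Int) : Int := (((attak.find? (fun p => p.1 == k)).map Prod.snd).getD 0)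

def pvSet (g : List (List Int)) (i j : Nat) (v : Int) : List (List Int) := g.modify i (fun row => row.set j v)

def pvStepA (battle : List (List Int)) (attak : List (Int × Int)) (R C : Nat) (t : List (List Int)) (i j : Nat) : List (List Int) :=
  let t1 := if i + 1 < R then (if pvAtk attak (pvCell battle i j) = pvCell battle (i+1) j then pvSet t (i+1) j (pvCell battle i j) else t) else t
  let t2 := if 1 ≤ i then (if pvAtk attak (pvCell battle i j) = pvCell battle (i-1) j then pvSet t1 (i-1) j (pvCell battle i j) else t1) else t1
  let t3 := if j + 1 < C then (if pvAtk attak (pvCell battle i j) = pvCell battle i (j+1) then pvSet t2 i (j+1) (pvCell battle i j) else t2) else t2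
  if 1 ≤ j then (if pvAtk attak (pvCell battle i j) = pvCell battle i (j-1) then pvSet t3 i (j-1) (pvCell battle i j) else t3) else t3

def make_battle (battle : List (List Int)) (n_brothers : Int) (attak : List (Int × Int)) : List (List Int) :=
  let n_row := battle.length
  let n_col := (battle.getD 0 []).length
  let temp := (List.range n_row).map (fun i => (List.range n_col).map (fun j => pvCell battle i j))
  (List.range n_row).foldl (fun t i =>
    (List.range n_col).foldl (fun t j => pvStepA battle attak n_row n_col t i j) t) temp

-- ===== PORT B =====
def pvNbrUpd (battle : List (List Int)) (attak : List (Int × Int)) (R C : Nat) (t : Int) (v : Int) (rc : Int × Int) : Int :=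
  if 0 ≤ rc.1 ∧ rc.1 < (R : Int) ∧ 0 ≤ rc.2 ∧ rc.2 < (C : Int) then
    (if pvAtk attak (pvCell battle rc.1.toNat rc.2.toNat) = t then pvCell battle rc.1.toNat rc.2.toNat else v)
  else v

def make_battle_alt (battle : List (List Int)) (n_brothers : Int) (attak : List (Int × Int)) : List (List Int) :=
  let n_row := battle.length
  let n_col := (battle.getD 0 []).length
  (List.range n_row).map (fun i =>
    (List.range n_col).map (fun j =>
      let t := pvCell battle i j
      [((i:Int)-1,(j:Int)), ((i:Int),(j:Int)-1), ((i:Int),(j:Int)+1), ((i:Int)+1,(j:Int))].foldl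
        (pvNbrUpd battle attak n_row n_col t) t))

-- ===== PRECONDITION & SPEC =====
-- Pre_ excludes exactly the inputs where Python A raises: battle == [] (IndexError on battle[0]),
-- a row shorter than row 0 (IndexError on battle[i][j]), and — whenever some cell has a neighbour,
-- i.e. n_col >= 1 and (n_row >= 2 or n_col >= 2), so the guarded attak lookups run — a cell value
-- that is not a key of the dict attak (KeyError).
def Pre_make_battle (battle : List (List Int)) (n_brothers : Int) (attak : List (Int × Int)) : Prop :=
  battle ≠ [] ∧
  (∀ row ∈ battle, (battle.headD []).length ≤ row.length) ∧
  ((1 ≤ (battle.headD []).length ∧ (2 ≤ battle.length ∨ 2 ≤ (battle.headD []).length)) →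
    ∀ row ∈ battle, ∀ x ∈ row.take (battle.headD []).length, ((attak.map Prod.fst).contains x) = true)
instance (battle : List (List Int)) (n_brothers : Int) (attak : List (Int × Int)) : Decidable (Pre_make_battle battle n_brothers attak) := by unfold Pre_make_battle; infer_instance

def pvWitness_make_battle : List (List Int) × Int × (List (Int × Int)) := ([[0, 1], [1, 0]], 2, [(0, 1), (1, 0)])

def Spec_make_battle (battle : List (List Int)) (n_brothers : Int) (attak : List (Int × Int)) (out : List (List Int)) : Prop := out = make_battle_alt battle n_brothers attak
instance (battle : List (List Int)) (n_brothers : Int) (attak : List (Int × Int)) (out : List (List Int)) : Decidable (Spec_make_battle battle n_brothers attak out) := by unfold Spec_make_battle; infer_instance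

-- ===== CLAIM (what is proved, stated in full; the proofs are below) =====
def Claim_equal_make_battle : Prop := ∀ (battle : List (List Int)) (n_brothers : Int) (attak : List (Int × Int)), Dom_make_battle battle n_brothers attak → Pre_make_battle battle n_brothers attak → Spec_make_battle battle n_brothers attak (make_battle battle n_brothers attak)

-- ===== LEMMAS AND PROOFS =====
def pvShape (R C : Nat) (t : List (List Int)) : Prop :=
  t.length = R ∧ ∀ k, k < R → (t.getD k []).length = C

def pvCellStep (battle : List (List Int)) (attak : List (Int × Int)) (R C r c : Nat) (v : Int) (i j : Nat) : Int :=
  let v1 := if (i + 1 < R) ∧ (pvAtk attak (pvCell battle i j) = pvCell battle (i+1) j) ∧ ((i+1 = r) ∧ (j = c)) then pvCell battle i j else v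
  let v2 := if (1 ≤ i) ∧ (pvAtk attak (pvCell battle i j) = pvCell battle (i-1) j) ∧ ((i-1 = r) ∧ (j = c)) then pvCell battle i j else v1
  let v3 := if (j + 1 < C) ∧ (pvAtk attak (pvCell battle i j) = pvCell battle i (j+1)) ∧ ((i = r) ∧ (j+1 = c)) then pvCell battle i j else v2
  if (1 ≤ j) ∧ (pvAtk attak (pvCell battle i j) = pvCell battle i (j-1)) ∧ ((i = r) ∧ (j-1 = c)) then pvCell battle i j else v3

def pvCanon (battle : List (List Int)) (attak : List (Int × Int)) (R C r c : Nat) : Int :=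
  let t := pvCell battle r c
  let v1 := if 1 ≤ r ∧ pvAtk attak (pvCell battle (r-1) c) = t then pvCell battle (r-1) c else t
  let v2 := if 1 ≤ c ∧ pvAtk attak (pvCell battle r (c-1)) = t then pvCell battle r (c-1) else v1
  let v3 := if c + 1 < C ∧ pvAtk attak (pvCell battle r (c+1)) = t then pvCell battle r (c+1) else v2
  if r + 1 < R ∧ pvAtk attak (pvCell battle (r+1) c) = t then pvCell battle (r+1) c else v3

theorem pvShape_set {R C : Nat} {t : List (List Int)} (h : pvShape R C t) (i j : Nat) (v : Int) :
    pvShape R C (pvSet t i j v) := by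
  refine ⟨by simpa [pvSet] using h.1, fun k hk => ?_⟩
  have h2 := h.2 k hk
  simp only [pvSet, List.getD_eq_getElem?_getD, List.getElem?_modify] at *
  cases ht : t[k]? with
  | none => simp only [ht] at h2 ⊢; simpa using h2
  | some row =>
    simp only [ht, Option.map_some, Option.getD_some] at h2 ⊢
    split <;> simp [h2]

theorem pvCell_set {R C r c : Nat} {t : List (List Int)} (h : pvShape R C t)
    (hr : r < R) (hc : c < C) (i j : Nat) (hi : i < R) (hj : j < C) (v : Int) :
    pvCell (pvSet t i j v) r c = if i = r ∧ j = c then v else pvCell t r c := by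
  have hr' : r < t.length := h.1 ▸ hr
  have hrowlen : (t.getD r []).length = C := h.2 r hr
  simp only [List.getD_eq_getElem?_getD, List.getElem?_eq_getElem hr'] at hrowlen
  simp only [Option.getD_some] at hrowlen
  unfold pvCell pvSet
  simp only [List.getD_eq_getElem?_getD, List.getElem?_modify, List.getElem?_eq_getElem hr',
    Option.map_some, Option.getD_some]
  have hjlen : j < C := hj
  by_cases hir : i = r
  · subst hir
    by_cases hjc : j = c
    · subst hjc
      have hlt : j < t[i].length := by omega
      simp [List.getElem?_set, hlt]
    · simp [hjc, List.getElem?_set]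
  · simp [hir]

theorem pvShape_guard {R C : Nat} {t : List (List Int)} (h : pvShape R C t)
    (P Q : Prop) [Decidable P] [Decidable Q] (i' j' : Nat) (v : Int) :
    pvShape R C (if P then (if Q then pvSet t i' j' v else t) else t) := by
  split_ifs <;> first | exact pvShape_set h _ _ _ | exact h

theorem pvCell_guard {R C r c : Nat} {t : List (List Int)} (h : pvShape R C t)
    (hr : r < R) (hc : c < C) (P Q : Prop) [Decidable P] [Decidable Q] {i' j' : Nat}
    (hb : P → i' < R ∧ j' < C) (v : Int) :
    pvCell (if P then (if Q then pvSet t i' j' v else t) else t) r c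
      = if P ∧ Q ∧ ((i' = r) ∧ (j' = c)) then v else pvCell t r c := by
  by_cases h1 : P
  · by_cases h2 : Q
    · rw [if_pos h1, if_pos h2, pvCell_set h hr hc i' j' (hb h1).1 (hb h1).2 v]
      by_cases h3 : (i' = r) ∧ (j' = c)
      · rw [if_pos h3, if_pos ⟨h1, h2, h3⟩]
      · rw [if_neg h3, if_neg (fun hcon => h3 hcon.2.2)]
    · rw [if_pos h1, if_neg h2, if_neg (fun hcon => h2 hcon.2.1)]
  · rw [if_neg h1, if_neg (fun hcon => h1 hcon.1)]

theorem pvShape_stepA {R C : Nat} {t : List (List Int)} (h : pvShape R C t)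
    (battle : List (List Int)) (attak : List (Int × Int)) (i j : Nat) :
    pvShape R C (pvStepA battle attak R C t i j) := by
  simp only [pvStepA]
  exact pvShape_guard (pvShape_guard (pvShape_guard (pvShape_guard h _ _ _ _ _) _ _ _ _ _) _ _ _ _ _) _ _ _ _ _

theorem pvCell_stepA {R C r c : Nat} {t : List (List Int)} (h : pvShape R C t)
    (battle : List (List Int)) (attak : List (Int × Int))
    (hr : r < R) (hc : c < C) (i j : Nat) (hi : i < R) (hj : j < C) :
    pvCell (pvStepA battle attak R C t i j) r c = pvCellStep battle attak R C r c (pvCell t r c) i j := by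
  simp only [pvStepA, pvCellStep]
  rw [pvCell_guard (pvShape_guard (pvShape_guard (pvShape_guard h _ _ _ _ _) _ _ _ _ _) _ _ _ _ _) hr hc _ _ (fun _ => by omega),
      pvCell_guard (pvShape_guard (pvShape_guard h _ _ _ _ _) _ _ _ _ _) hr hc _ _ (fun _ => by omega),
      pvCell_guard (pvShape_guard h _ _ _ _ _) hr hc _ _ (fun _ => by omega),
      pvCell_guard h hr hc _ _ (fun hp => by omega)]

theorem pvShape_foldl_inner {R C : Nat} (battle : List (List Int)) (attak : List (Int × Int))
    (i : Nat) (js : List Nat) {t : List (List Int)} (h : pvShape R C t) :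
    pvShape R C (js.foldl (fun t j => pvStepA battle attak R C t i j) t) := by
  induction js generalizing t with
  | nil => exact h
  | cons j js ih => exact ih (pvShape_stepA h battle attak i j)

theorem pvShape_foldl2 {R C : Nat} (battle : List (List Int)) (attak : List (Int × Int))
    (is : List Nat) {t : List (List Int)} (h : pvShape R C t) :
    pvShape R C (is.foldl (fun t i => (List.range C).foldl (fun t j => pvStepA battle attak R C t i j) t) t) := by
  induction is generalizing t with
  | nil => exact h
  | cons i is ih => exact ih (pvShape_foldl_inner battle attak i _ h)

theorem pvCell_foldl_inner {R C r c : Nat} (battle : List (List Int)) (attak : List (Int × Int))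
    (i : Nat) (hi : i < R) (hr : r < R) (hc : c < C) (js : List Nat) (hjs : ∀ j ∈ js, j < C)
    {t : List (List Int)} (h : pvShape R C t) :
    pvCell (js.foldl (fun t j => pvStepA battle attak R C t i j) t) r c
      = js.foldl (fun v j => pvCellStep battle attak R C r c v i j) (pvCell t r c) := by
  induction js generalizing t with
  | nil => rfl
  | cons j js ih =>
    simp only [List.foldl_cons]
    rw [ih (fun x hx => hjs x (List.mem_cons_of_mem _ hx)) (pvShape_stepA h battle attak i j),
        pvCell_stepA h battle attak hr hc i j hi (hjs j (List.mem_cons_self ..))]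

theorem pvCell_foldl_outer {R C r c : Nat} (battle : List (List Int)) (attak : List (Int × Int))
    (hr : r < R) (hc : c < C) (is : List Nat) (his : ∀ i ∈ is, i < R)
    {t : List (List Int)} (h : pvShape R C t) :
    pvCell (is.foldl (fun t i => (List.range C).foldl (fun t j => pvStepA battle attak R C t i j) t) t) r c
      = is.foldl (fun v i => (List.range C).foldl (fun v j => pvCellStep battle attak R C r c v i j) v) (pvCell t r c) := by
  induction is generalizing t with
  | nil => rfl
  | cons i is ih =>
    simp only [List.foldl_cons]
    rw [ih (fun x hx => his x (List.mem_cons_of_mem _ hx)) (pvShape_foldl_inner battle attak i _ h),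
        pvCell_foldl_inner battle attak i (his i (List.mem_cons_self ..)) hr hc _ (fun j hj => List.mem_range.mp hj) h]

theorem pv_foldl_id {α : Type} (f : Int → α → Int) (l : List α) (hid : ∀ v x, x ∈ l → f v x = v) (v : Int) :
    l.foldl f v = v := by
  induction l generalizing v with
  | nil => rfl
  | cons x xs ih =>
    simp only [List.foldl_cons]
    rw [hid v x (List.mem_cons_self ..)]
    exact ih (fun v y hy => hid v y (List.mem_cons_of_mem _ hy)) v

theorem pv_filter_succ (sp : List Nat) (hp : sp.Pairwise (· < ·)) (n : Nat) (hn : n ∈ sp) :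
    sp.filter (fun x => decide (x < n + 1)) = sp.filter (fun x => decide (x < n)) ++ [n] := by
  induction sp with
  | nil => cases hn
  | cons a tl ih =>
    have htl : ∀ x ∈ tl, a < x := fun x hx => (List.pairwise_cons.mp hp).1 x hx
    by_cases han : a = n
    · subst han
      have h1 : tl.filter (fun x => decide (x < a + 1)) = [] :=
        List.filter_eq_nil_iff.mpr (fun x hx => by have := htl x hx; simp; omega)
      have h2 : tl.filter (fun x => decide (x < a)) = [] :=
        List.filter_eq_nil_iff.mpr (fun x hx => by have := htl x hx; simp; omega)
      simp only [List.filter_cons]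
      rw [h1, h2]
      simp
    · have hntl : n ∈ tl := by cases hn with | head => exact absurd rfl han | tail _ h => exact h
      have haln : a < n := htl n hntl
      have := ih (List.pairwise_cons.mp hp).2 hntl
      simp only [List.filter_cons]
      rw [this]
      have c1 : decide (a < n + 1) = true := by simp; omega
      have c2 : decide (a < n) = true := by simp; omega
      simp [c1, c2]
      omega

theorem pv_foldl_range_sp (f : Int → Nat → Int) (sp : List Nat) (hp : sp.Pairwise (· < ·))
    (n : Nat) (hid : ∀ v j, j < n → j ∉ sp → f v j = v) (v : Int) :
    (List.range n).foldl f v = (sp.filter (fun x => decide (x < n))).foldl f v := by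
  induction n with
  | zero =>
    have : sp.filter (fun x => decide (x < 0)) = [] := List.filter_eq_nil_iff.mpr (fun x hx => by simp)
    simp [this]
  | succ n ih =>
    rw [List.range_succ, List.foldl_append]
    have ih' := ih (fun v j hj hns => hid v j (by omega) hns)
    by_cases hn : n ∈ sp
    · rw [pv_filter_succ sp hp n hn, List.foldl_append, ih']
    · have : sp.filter (fun x => decide (x < n + 1)) = sp.filter (fun x => decide (x < n)) := by
        apply List.filter_congr
        intro x hx
        have : x ≠ n := fun hcon => hn (hcon ▸ hx)
        simp; omega
      rw [this, ← ih']
      simp only [List.foldl_cons, List.foldl_nil]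
      exact hid _ n (by omega) hn

theorem pvCellStep_id_row {R C r c : Nat} (battle : List (List Int)) (attak : List (Int × Int))
    (i j : Nat) (h1 : i + 1 ≠ r) (h2 : i ≠ r + 1) (h3 : i ≠ r) (v : Int) :
    pvCellStep battle attak R C r c v i j = v := by
  simp only [pvCellStep]
  rw [if_neg (fun hc => by have := hc.1; have := hc.2.2.1; omega),
      if_neg (fun hc => by have := hc.2.2.1; omega),
      if_neg (fun hc => by have := hc.2.2.1; omega),
      if_neg (fun hc => by have := hc.2.2.1; omega)]

theorem pvCellStep_id_up {R C r c : Nat} (battle : List (List Int)) (attak : List (Int × Int))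
    (j : Nat) (hr1 : 1 ≤ r) (hj : j ≠ c) (v : Int) :
    pvCellStep battle attak R C r c v (r-1) j = v := by
  simp only [pvCellStep]
  rw [if_neg (fun hc => by have := hc.2.2.2; omega),
      if_neg (fun hc => by have := hc.1; have := hc.2.2.1; omega),
      if_neg (fun hc => by have := hc.2.2.1; omega),
      if_neg (fun hc => by have := hc.2.2.1; omega)]

theorem pvCellStep_id_mid {R C r c : Nat} (battle : List (List Int)) (attak : List (Int × Int))
    (j : Nat) (hj1 : j + 1 ≠ c) (hj2 : j ≠ c + 1) (v : Int) :
    pvCellStep battle attak R C r c v r j = v := by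
  simp only [pvCellStep]
  rw [if_neg (fun hc => by have := hc.2.2.1; omega),
      if_neg (fun hc => by have := hc.1; have := hc.2.2.1; omega),
      if_neg (fun hc => by have := hc.2.2.2; omega),
      if_neg (fun hc => by have := hc.1; have := hc.2.2.2; omega)]

theorem pvCellStep_id_down {R C r c : Nat} (battle : List (List Int)) (attak : List (Int × Int))
    (j : Nat) (hj : j ≠ c) (v : Int) :
    pvCellStep battle attak R C r c v (r+1) j = v := by
  simp only [pvCellStep]
  rw [if_neg (fun hc => by have := hc.2.2.1; omega),
      if_neg (fun hc => by have := hc.2.2.2; omega),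
      if_neg (fun hc => by have := hc.2.2.1; omega),
      if_neg (fun hc => by have := hc.2.2.1; omega)]

theorem pvCellStep_eval_up {R C r c : Nat} (battle : List (List Int)) (attak : List (Int × Int))
    (hr1 : 1 ≤ r) (hr : r < R) (v : Int) :
    pvCellStep battle attak R C r c v (r-1) c
      = if pvAtk attak (pvCell battle (r-1) c) = pvCell battle r c then pvCell battle (r-1) c else v := by
  have e : r - 1 + 1 = r := by omega
  simp only [pvCellStep, e]
  rw [if_neg (fun hcon : _ ∧ _ ∧ _ => by have h1 := hcon.2.2.1; omega),
      if_neg (fun hcon : _ ∧ _ ∧ _ => by have h1 := hcon.2.2.1; omega),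
      if_neg (fun hcon : _ ∧ _ ∧ _ => by have h0 := hcon.1; have h1 := hcon.2.2.1; omega)]
  by_cases hat : pvAtk attak (pvCell battle (r-1) c) = pvCell battle r c
  · rw [if_pos ⟨hr, hat, by simp⟩, if_pos hat]
  · rw [if_neg (fun hcon : _ ∧ _ ∧ _ => hat hcon.2.1), if_neg hat]

theorem pvCellStep_eval_left {R C r c : Nat} (battle : List (List Int)) (attak : List (Int × Int))
    (hc1 : 1 ≤ c) (hc : c < C) (v : Int) :
    pvCellStep battle attak R C r c v r (c-1)
      = if pvAtk attak (pvCell battle r (c-1)) = pvCell battle r c then pvCell battle r (c-1) else v := by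
  have e : c - 1 + 1 = c := by omega
  simp only [pvCellStep, e]
  rw [if_neg (fun hcon : _ ∧ _ ∧ _ => by have h0 := hcon.1; have h1 := hcon.2.2.2; omega)]
  by_cases hat : pvAtk attak (pvCell battle r (c-1)) = pvCell battle r c
  · rw [if_pos ⟨hc, hat, by simp⟩, if_pos hat]
  · rw [if_neg (fun hcon : _ ∧ _ ∧ _ => hat hcon.2.1),
        if_neg (fun hcon : _ ∧ _ ∧ _ => by have h1 := hcon.2.2.2; omega),
        if_neg (fun hcon : _ ∧ _ ∧ _ => by have h1 := hcon.2.2.1; omega),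
        if_neg hat]

theorem pvCellStep_eval_right {R C r c : Nat} (battle : List (List Int)) (attak : List (Int × Int))
    (hcC : c + 1 < C) (v : Int) :
    pvCellStep battle attak R C r c v r (c+1)
      = if pvAtk attak (pvCell battle r (c+1)) = pvCell battle r c then pvCell battle r (c+1) else v := by
  have e : c + 1 - 1 = c := by omega
  simp only [pvCellStep, e]
  by_cases hat : pvAtk attak (pvCell battle r (c+1)) = pvCell battle r c
  · rw [if_pos ⟨by omega, hat, by simp⟩, if_pos hat]
  · rw [if_neg (fun hcon : _ ∧ _ ∧ _ => hat hcon.2.1),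
        if_neg (fun hcon : _ ∧ _ ∧ _ => by have h1 := hcon.2.2.2; omega),
        if_neg (fun hcon : _ ∧ _ ∧ _ => by have h1 := hcon.2.2.2; omega),
        if_neg (fun hcon : _ ∧ _ ∧ _ => by have h1 := hcon.2.2.1; omega),
        if_neg hat]

theorem pvCellStep_eval_down {R C r c : Nat} (battle : List (List Int)) (attak : List (Int × Int))
    (hrR : r + 1 < R) (v : Int) :
    pvCellStep battle attak R C r c v (r+1) c
      = if pvAtk attak (pvCell battle (r+1) c) = pvCell battle r c then pvCell battle (r+1) c else v := by
  have e : r + 1 - 1 = r := by omega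
  simp only [pvCellStep, e]
  rw [if_neg (fun hcon : _ ∧ _ ∧ _ => by have h1 := hcon.2.2.1; omega),
      if_neg (fun hcon : _ ∧ _ ∧ _ => by have h1 := hcon.2.2.1; omega)]
  by_cases hat : pvAtk attak (pvCell battle (r+1) c) = pvCell battle r c
  · rw [if_pos ⟨by omega, hat, by simp⟩, if_pos hat]
  · rw [if_neg (fun hcon : _ ∧ _ ∧ _ => hat hcon.2.1),
        if_neg (fun hcon : _ ∧ _ ∧ _ => by have h1 := hcon.2.2.1; omega),
        if_neg hat]

theorem pvRow_up {R C r c : Nat} (battle : List (List Int)) (attak : List (Int × Int))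
    (hr1 : 1 ≤ r) (hr : r < R) (hc : c < C) (v : Int) :
    (List.range C).foldl (fun v j => pvCellStep battle attak R C r c v (r-1) j) v
      = if pvAtk attak (pvCell battle (r-1) c) = pvCell battle r c then pvCell battle (r-1) c else v := by
  rw [pv_foldl_range_sp _ [c] (by simp) C
      (fun v j hj hns => pvCellStep_id_up battle attak j hr1 (by simpa using hns) v) v]
  have hf : ([c].filter (fun x => decide (x < C))) = [c] := by simp [hc]
  rw [hf]
  simp only [List.foldl_cons, List.foldl_nil]
  exact pvCellStep_eval_up battle attak hr1 hr v

theorem pvRow_down {R C r c : Nat} (battle : List (List Int)) (attak : List (Int × Int))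
    (hrR : r + 1 < R) (hc : c < C) (v : Int) :
    (List.range C).foldl (fun v j => pvCellStep battle attak R C r c v (r+1) j) v
      = if pvAtk attak (pvCell battle (r+1) c) = pvCell battle r c then pvCell battle (r+1) c else v := by
  rw [pv_foldl_range_sp _ [c] (by simp) C
      (fun v j hj hns => pvCellStep_id_down battle attak j (by simpa using hns) v) v]
  have hf : ([c].filter (fun x => decide (x < C))) = [c] := by simp [hc]
  rw [hf]
  simp only [List.foldl_cons, List.foldl_nil]
  exact pvCellStep_eval_down battle attak hrR v

theorem pvRow_mid {R C r c : Nat} (battle : List (List Int)) (attak : List (Int × Int))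
    (hr : r < R) (hc : c < C) (v : Int) :
    (List.range C).foldl (fun v j => pvCellStep battle attak R C r c v r j) v
      = if c + 1 < C ∧ pvAtk attak (pvCell battle r (c+1)) = pvCell battle r c then pvCell battle r (c+1)
        else if 1 ≤ c ∧ pvAtk attak (pvCell battle r (c-1)) = pvCell battle r c then pvCell battle r (c-1) else v := by
  by_cases hc1 : 1 ≤ c
  · rw [pv_foldl_range_sp _ [c-1, c+1] (by simp; try omega) C
        (fun v j hj hns => by
          have h1 : j ≠ c - 1 ∧ j ≠ c + 1 := by simpa using hns
          exact pvCellStep_id_mid battle attak j (by omega) (by omega) v) v]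
    by_cases hcC : c + 1 < C
    · have hf : ([c-1, c+1].filter (fun x => decide (x < C))) = [c-1, c+1] := by
        simp [show c - 1 < C by omega, hcC]
      rw [hf]
      simp only [List.foldl_cons, List.foldl_nil]
      rw [pvCellStep_eval_left battle attak hc1 hc v, pvCellStep_eval_right battle attak hcC]
      simp [hcC, hc1]
    · have hf : ([c-1, c+1].filter (fun x => decide (x < C))) = [c-1] := by
        simp [show c - 1 < C by omega, hcC]
      rw [hf]
      simp only [List.foldl_cons, List.foldl_nil]
      rw [pvCellStep_eval_left battle attak hc1 hc v]
      simp [hcC, hc1]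
  · have hc0 : c = 0 := by omega
    subst hc0
    rw [pv_foldl_range_sp _ [1] (by simp) C
        (fun v j hj hns => pvCellStep_id_mid battle attak j (by omega) (by simpa using hns) v) v]
    by_cases hcC : 0 + 1 < C
    · have hf : (([1] : List Nat).filter (fun x => decide (x < C))) = [1] := by
        simp; omega
      rw [hf]
      simp only [List.foldl_cons, List.foldl_nil]
      rw [pvCellStep_eval_right battle attak (by omega)]
      simp only [show (0:Nat) + 1 = 1 from rfl]
      simp [show ¬ ((1:Nat) ≤ 0) by omega, hcC]
    · have hf : (([1] : List Nat).filter (fun x => decide (x < C))) = [] := by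
        simp; omega
      rw [hf]
      simp only [List.foldl_nil]
      simp [show ¬ ((1:Nat) ≤ 0) by omega, hcC]

theorem pvCell_A_canon {R C r c : Nat} (battle : List (List Int)) (attak : List (Int × Int))
    (hr : r < R) (hc : c < C) :
    (List.range R).foldl (fun v i => (List.range C).foldl (fun v j => pvCellStep battle attak R C r c v i j) v) (pvCell battle r c)
      = pvCanon battle attak R C r c := by
  by_cases hr1 : 1 ≤ r
  · rw [pv_foldl_range_sp _ [r-1, r, r+1] (by simp; try omega) R
        (fun v i hi hns => by
          have h1 : i ≠ r - 1 ∧ i ≠ r ∧ i ≠ r + 1 := by simpa using hns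
          exact pv_foldl_id _ _ (fun v j _ =>
            pvCellStep_id_row battle attak i j (by omega) (by omega) (by omega) v) v) _]
    by_cases hR : r + 1 < R
    · have hf : ([r-1, r, r+1].filter (fun x => decide (x < R))) = [r-1, r, r+1] := by
        simp [show r - 1 < R by omega, hr, hR]
      rw [hf]
      simp only [List.foldl_cons, List.foldl_nil]
      rw [pvRow_up battle attak hr1 hr hc, pvRow_mid battle attak hr hc, pvRow_down battle attak hR hc]
      simp only [pvCanon, hr1, hR, true_and]
    · have hf : ([r-1, r, r+1].filter (fun x => decide (x < R))) = [r-1, r] := by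
        simp [show r - 1 < R by omega, hr, hR]
      rw [hf]
      simp only [List.foldl_cons, List.foldl_nil]
      rw [pvRow_up battle attak hr1 hr hc, pvRow_mid battle attak hr hc]
      simp only [pvCanon, hr1, true_and]
      rw [if_neg (fun hcon : (r + 1 < R) ∧ _ => hR hcon.1)]
  · have hr0 : r = 0 := by omega
    subst hr0
    rw [pv_foldl_range_sp _ [0, 1] (by simp) R
        (fun v i hi hns => by
          have h1 : i ≠ 0 ∧ i ≠ 1 := by simpa using hns
          exact pv_foldl_id _ _ (fun v j _ =>
            pvCellStep_id_row battle attak i j (by omega) (by omega) (by omega) v) v) _]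
    by_cases hR : 0 + 1 < R
    · have hf : (([0, 1] : List Nat).filter (fun x => decide (x < R))) = [0, 1] := by
        simp [hr]; omega
      rw [hf]
      simp only [List.foldl_cons, List.foldl_nil]
      rw [pvRow_mid battle attak hr hc, pvRow_down battle attak (by omega) hc]
      simp only [pvCanon]
      rw [if_neg (fun hcon : (1 ≤ 0) ∧ _ => by omega)]
      simp [hR]
    · have hf : (([0, 1] : List Nat).filter (fun x => decide (x < R))) = [0] := by
        simp [hr]; omega
      rw [hf]
      simp only [List.foldl_cons, List.foldl_nil]
      rw [pvRow_mid battle attak hr hc]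
      simp only [pvCanon]
      rw [if_neg (fun hcon : (1 ≤ 0) ∧ _ => by omega), if_neg (fun hcon : (0 + 1 < R) ∧ _ => hR hcon.1)]

theorem pv_if_if {P Q : Prop} [Decidable P] [Decidable Q] {a b : Int} :
    (if P then (if Q then a else b) else b) = if P ∧ Q then a else b := by
  split_ifs <;> first | rfl | tauto

theorem pvAlt_cell {R C r c : Nat} (battle : List (List Int)) (attak : List (Int × Int))
    (hr : r < R) (hc : c < C) :
    [((r:Int)-1,(c:Int)), ((r:Int),(c:Int)-1), ((r:Int),(c:Int)+1), ((r:Int)+1,(c:Int))].foldl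
      (pvNbrUpd battle attak R C (pvCell battle r c)) (pvCell battle r c)
      = pvCanon battle attak R C r c := by
  have t1 : ((r:Int) - 1).toNat = r - 1 := by omega
  have t2 : ((c:Int) - 1).toNat = c - 1 := by omega
  have t3 : ((c:Int) + 1).toNat = c + 1 := by omega
  have t4 : ((r:Int) + 1).toNat = r + 1 := by omega
  have t5 : ((r:Int)).toNat = r := by omega
  have t6 : ((c:Int)).toNat = c := by omega
  have G1 : (0 ≤ (r:Int) - 1 ∧ (r:Int) - 1 < (R:Int) ∧ 0 ≤ (c:Int) ∧ (c:Int) < (C:Int)) ↔ (1 ≤ r) := by omega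
  have G2 : (0 ≤ (r:Int) ∧ (r:Int) < (R:Int) ∧ 0 ≤ (c:Int) - 1 ∧ (c:Int) - 1 < (C:Int)) ↔ (1 ≤ c) := by omega
  have G3 : (0 ≤ (r:Int) ∧ (r:Int) < (R:Int) ∧ 0 ≤ (c:Int) + 1 ∧ (c:Int) + 1 < (C:Int)) ↔ (c + 1 < C) := by omega
  have G4 : (0 ≤ (r:Int) + 1 ∧ (r:Int) + 1 < (R:Int) ∧ 0 ≤ (c:Int) ∧ (c:Int) < (C:Int)) ↔ (r + 1 < R) := by omega
  simp only [List.foldl_cons, List.foldl_nil, pvNbrUpd, G1, G2, G3, G4, t1, t2, t3, t4, t5, t6]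
  rw [pv_if_if, pv_if_if, pv_if_if, pv_if_if]
  simp only [pvCanon]

theorem pvShape_temp (battle : List (List Int)) (R C : Nat) :
    pvShape R C ((List.range R).map (fun i => (List.range C).map (fun j => pvCell battle i j))) := by
  refine ⟨by simp, fun k hk => ?_⟩
  rw [List.getD_eq_getElem?_getD, List.getElem?_map, List.getElem?_range hk]
  simp

theorem pvCell_temp (battle : List (List Int)) {R C r c : Nat} (hr : r < R) (hc : c < C) :
    pvCell ((List.range R).map (fun i => (List.range C).map (fun j => pvCell battle i j))) r c
      = pvCell battle r c := by
  simp only [pvCell, List.getD_eq_getElem?_getD, List.getElem?_map, List.getElem?_range hr,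
    Option.map_some, Option.getD_some, List.getElem?_range hc]

theorem pvCell_getElem {R C r c : Nat} {t : List (List Int)} (h : pvShape R C t)
    (hr : r < R) (hc : c < C) (h1 : r < t.length) (h2 : c < t[r].length) :
    t[r][c] = pvCell t r c := by
  simp only [pvCell, List.getD_eq_getElem?_getD, List.getElem?_eq_getElem h1,
    Option.getD_some, List.getElem?_eq_getElem h2]

theorem pv_main (battle : List (List Int)) (n_brothers : Int) (attak : List (Int × Int)) :
    make_battle battle n_brothers attak = make_battle_alt battle n_brothers attak := by
  simp only [make_battle, make_battle_alt]
  have hshape := pvShape_foldl2 battle attak (List.range battle.length)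
    (h := pvShape_temp battle battle.length (battle.getD 0 []).length)
  apply List.ext_getElem
  · rw [hshape.1]; simp
  · intro r h1 h2
    have hrR : r < battle.length := by rw [← hshape.1]; exact h1
    apply List.ext_getElem
    · have hrow := hshape.2 r hrR
      rw [List.getD_eq_getElem?_getD, List.getElem?_eq_getElem h1] at hrow
      simp only [Option.getD_some] at hrow
      rw [hrow]
      simp [List.getElem_map, List.getElem_range]
    · intro c hc1 hc2
      have hcC : c < (battle.getD 0 []).length := by
        have hrow := hshape.2 r hrR
        rw [List.getD_eq_getElem?_getD, List.getElem?_eq_getElem h1] at hrow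
        simp only [Option.getD_some] at hrow
        rw [← hrow]; exact hc1
      rw [pvCell_getElem hshape hrR hcC h1 hc1]
      rw [pvCell_foldl_outer battle attak hrR hcC (List.range battle.length)
            (fun i hi => List.mem_range.mp hi) (pvShape_temp battle _ _),
          pvCell_temp battle hrR hcC,
          pvCell_A_canon battle attak hrR hcC]
      simp only [List.getElem_map, List.getElem_range]
      exact (pvAlt_cell battle attak hrR hcC).symm

-- ===== VERDICT (by name: the statement is the Claim_ definition above) =====
theorem make_battle_spec : Claim_equal_make_battle := by
  intro battle n_brothers attak _ _
  exact pv_main battle n_brothers attak
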